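-- pv_equiv track=rewrite | github.com/numediart/multi-rnn-wordlevel | stats.py | match_sequences
-- ===== SOURCE A (Python) =====
-- def match_sequences(words, data, window):
--     # First element in words and data are matching
--     # Return the size of the longest sequence found with a flexibility window
--
--     if len(words) == 0:
--         return 0, 0, 0
--
--     seq = 1
--     data_pointer = 1
--     words_pointer = 1
--     while data_pointer < len(data) and words_pointer < len(words):
--         real_window = min(len(data) - data_pointer, len(words) - words_pointer, window)
--
--         words_window = words[words_pointer:words_pointer + real_window]
--         data_window = data[data_pointer:data_pointer + real_window]
--
--         found, i, j = match_window(words_window, data_window)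
--
--         if not found:
--             break
--
--         seq += 1
--         words_pointer += i + 1
--         data_pointer += j + 1
--
--     return seq, words_pointer, data_pointer
--
-- def match_window(data_1, data_2):
--     # Find index of first corresponding element
--     for i in range(len(data_1)):
--         for j in range(len(data_2)):
--             if data_1[i] == data_2[j]:
--                 return True, i, j
--     return False, -1, -1
-- ===== SOURCE B (Python) =====
-- def match_sequences(words, data, window):
--     # Different algorithm: build ONE global value -> sorted positions index of
--     # data up front; each step finds the earliest in-window data position by
--     # binary search on that index instead of scanning the data window.
--     if len(words) == 0:
--         return 0, 0, 0
--
--     pos = {}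
--     for k in range(len(data)):
--         pos.setdefault(data[k], []).append(k)
--
--     def first_in_range(v, lo, hi):
--         # least position p of v with lo <= p < hi, via binary search; else None
--         ps = pos.get(v)
--         if ps is None:
--             return None
--         a, b = 0, len(ps)
--         while a < b:
--             m = (a + b) // 2
--             if ps[m] < lo:
--                 a = m + 1
--             else:
--                 b = m
--         if a < len(ps) and ps[a] < hi:
--             return ps[a]
--         return None
--
--     seq = 1
--     data_pointer = 1
--     words_pointer = 1
--     while data_pointer < len(data) and words_pointer < len(words):
--         real_window = min(len(data) - data_pointer, len(words) - words_pointer, window)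
--         hit = None
--         for i in range(real_window):
--             p = first_in_range(words[words_pointer + i], data_pointer, data_pointer + real_window)
--             if p is not None:
--                 hit = (i, p)
--                 break
--         if hit is None:
--             break
--         i, p = hit
--         seq += 1
--         words_pointer += i + 1
--         data_pointer = p + 1
--     return seq, words_pointer, data_pointer
-- ===== Notes on version B (the rewrite author's own statement) =====
-- stated objective: faster
-- what changed: Instead of slicing and scanning a fresh data window each step (nested first-match scan), B builds one global value->sorted-positions index of data up front and finds each step's earliest in-window data position by binary search on that index.
-- intended difference: For window < 0 (when the wrapped first windows words[1:1+window] and data[1:1+window] share a value), A's negative slice bound wraps around Python-style and A keeps matching inside these accidental windows, returning seq >= 2; B treats a non-positive window as empty look-ahead and returns (1, 1, 1), the intended behaviour of a flexibility window. — e.g. on match_sequences([0, 1, 1], [0, 1, 1], -2): A returns (2, 2, 2), B returns (1, 1, 1)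
import Mathlib
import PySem

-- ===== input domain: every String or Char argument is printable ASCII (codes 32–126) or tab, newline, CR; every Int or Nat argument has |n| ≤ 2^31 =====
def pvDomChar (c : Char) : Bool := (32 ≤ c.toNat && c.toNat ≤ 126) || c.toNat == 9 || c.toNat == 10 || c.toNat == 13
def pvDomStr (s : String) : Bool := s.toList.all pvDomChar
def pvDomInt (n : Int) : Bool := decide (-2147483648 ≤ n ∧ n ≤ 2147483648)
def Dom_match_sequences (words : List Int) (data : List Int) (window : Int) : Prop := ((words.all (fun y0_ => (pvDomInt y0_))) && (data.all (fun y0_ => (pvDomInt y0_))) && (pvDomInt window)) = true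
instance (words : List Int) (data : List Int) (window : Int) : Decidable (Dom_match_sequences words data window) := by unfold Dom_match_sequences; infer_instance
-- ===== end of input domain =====

-- B replaces A's per-step data-window slicing and nested scan by ONE global
-- value -> sorted-positions index of data plus a binary search per probe (faster);
-- for window < 0 A's slice bound wraps around Python-style (accidental windows)
-- while B treats it as empty look-ahead — see D_match_sequences below.

-- ===== PORT A =====
-- inner 'for j in range(len(data_2))' of match_window: first index j (from j0) with x == element
def mwInner (x : Int) : List Int → Int → Option Int
  | [], _ => none
  | y :: t, j => if x = y then some j else mwInner x t (j + 1)

-- outer 'for i in range(len(data_1))' of match_window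
def mwOuter : List Int → List Int → Int → Bool × Int × Int
  | [], _, _ => (false, -1, -1)
  | x :: t, d2, i =>
    match mwInner x d2 0 with
    | some j => (true, i, j)
    | none => mwOuter t d2 (i + 1)

def match_window (data_1 data_2 : List Int) : Bool × Int × Int :=
  mwOuter data_1 data_2 0

-- A's while loop, with fuel (each iteration advances both pointers by ≥ 1,
-- so fuel = len data + len words + 1 is always enough)
def loopA (words data : List Int) (window : Int) : Nat → Int → Int → Int → Int × Int × Int
  | 0, seq, wp, dp => (seq, wp, dp)
  | Nat.succ f, seq, wp, dp =>
    if dp < (data.length : Int) ∧ wp < (words.length : Int) then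
      let rw := min (min ((data.length : Int) - dp) ((words.length : Int) - wp)) window
      let ww := PySem.List.slice words (some wp) (some (wp + rw))
      let dw := PySem.List.slice data (some dp) (some (dp + rw))
      match match_window ww dw with
      | (true, i, j) => loopA words data window f (seq + 1) (wp + i + 1) (dp + j + 1)
      | (false, _, _) => (seq, wp, dp)
    else (seq, wp, dp)

def match_sequences (words : List Int) (data : List Int) (window : Int) : Int × Int × Int :=
  if words.length = 0 then (0, 0, 0)
  else loopA words data window (data.length + words.length + 1) 1 1 1

-- ===== PORT B =====
-- 'for k in range(len(data)): pos.setdefault(data[k], []).append(k)'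
def buildPos : List Int → Int → PySem.Dict Int (List Int) → PySem.Dict Int (List Int)
  | [], _, d => d
  | v :: t, k, d => buildPos t (k + 1) (d.insert v (d.getD v [] ++ [k]))

-- 'while a < b: m = (a+b)//2; …' of first_in_range (indices are in range whenever
-- a < b ≤ len ps holds, which every call maintains; getD 0 is that in-range access)
def bsearch (ps : List Int) (lo : Int) : Nat → Nat → Nat → Nat
  | 0, a, _ => a
  | Nat.succ f, a, b =>
    if a < b then
      let m := (a + b) / 2
      if ps.getD m 0 < lo then bsearch ps lo f (m + 1) b else bsearch ps lo f a m
    else a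

def firstInRange (pos : PySem.Dict Int (List Int)) (v lo hi : Int) : Option Int :=
  match pos.get? v with
  | none => none
  | some ps =>
    let a := bsearch ps lo ps.length 0 ps.length
    if a < ps.length ∧ ps.getD a 0 < hi then some (ps.getD a 0) else none

-- 'for i in range(real_window): …' with break; words[words_pointer + i] is in
-- range on every call (i < real_window ≤ len words - words_pointer), getD 0 is that access
def scanW (pos : PySem.Dict Int (List Int)) (words : List Int) (wp dp hi : Int) :
    Nat → Int → Option (Int × Int)
  | 0, _ => none
  | Nat.succ n, i =>
    match firstInRange pos (words.getD (wp + i).toNat 0) dp hi with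
    | some p => some (i, p)
    | none => scanW pos words wp dp hi n (i + 1)

def loopB (words data : List Int) (window : Int) (pos : PySem.Dict Int (List Int)) :
    Nat → Int → Int → Int → Int × Int × Int
  | 0, seq, wp, dp => (seq, wp, dp)
  | Nat.succ f, seq, wp, dp =>
    if dp < (data.length : Int) ∧ wp < (words.length : Int) then
      let rw := min (min ((data.length : Int) - dp) ((words.length : Int) - wp)) window
      match scanW pos words wp dp (dp + rw) rw.toNat 0 with
      | some (i, p) => loopB words data window pos f (seq + 1) (wp + i + 1) (p + 1)
      | none => (seq, wp, dp)
    else (seq, wp, dp)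

def match_sequences_alt (words : List Int) (data : List Int) (window : Int) : Int × Int × Int :=
  if words.length = 0 then (0, 0, 0)
  else loopB words data window (buildPos data 0 PySem.Dict.empty) (data.length + words.length + 1) 1 1 1

-- ===== PRECONDITION & SPEC =====
-- For window < 0 (when the wrapped first windows words[1:1+window] and data[1:1+window]
-- share a value), A's negative slice bound wraps around Python-style and A keeps matching
-- inside these accidental windows, returning seq >= 2; B treats a non-positive window as
-- empty look-ahead and returns (1, 1, 1), the intended behaviour of a flexibility window.
def D_match_sequences (words : List Int) (data : List Int) (window : Int) : Prop :=
  window < 0 ∧ ∃ v ∈ PySem.List.slice words (some 1) (some (1 + window)),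
    v ∈ PySem.List.slice data (some 1) (some (1 + window))
instance (words : List Int) (data : List Int) (window : Int) : Decidable (D_match_sequences words data window) := by unfold D_match_sequences; infer_instance

def Spec_match_sequences (words : List Int) (data : List Int) (window : Int) (out : Int × Int × Int) : Prop := ¬ D_match_sequences words data window → out = match_sequences_alt words data window
instance (words : List Int) (data : List Int) (window : Int) (out : Int × Int × Int) : Decidable (Spec_match_sequences words data window out) := by unfold Spec_match_sequences; infer_instance

def pvDiffWitness_match_sequences : List Int × List Int × Int := ([0, 1, 1], [0, 1, 1], -2)
def pvDiffWitnessOut_match_sequences : (Int × Int × Int) × (Int × Int × Int) := ((2, 2, 2), (1, 1, 1))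

-- ===== CLAIM (what is proved, stated in full; the proofs are below) =====
def Claim_unchanged_match_sequences : Prop := ∀ (words : List Int) (data : List Int) (window : Int), Dom_match_sequences words data window → Spec_match_sequences words data window (match_sequences words data window)
def Claim_changed_match_sequences : Prop := Dom_match_sequences (pvDiffWitness_match_sequences.1) (pvDiffWitness_match_sequences.2.1) (pvDiffWitness_match_sequences.2.2) ∧ D_match_sequences (pvDiffWitness_match_sequences.1) (pvDiffWitness_match_sequences.2.1) (pvDiffWitness_match_sequences.2.2) ∧ match_sequences (pvDiffWitness_match_sequences.1) (pvDiffWitness_match_sequences.2.1) (pvDiffWitness_match_sequences.2.2) = pvDiffWitnessOut_match_sequences.1 ∧ match_sequences_alt (pvDiffWitness_match_sequences.1) (pvDiffWitness_match_sequences.2.1) (pvDiffWitness_match_sequences.2.2) = pvDiffWitnessOut_match_sequences.2 ∧ pvDiffWitnessOut_match_sequences.1 ≠ pvDiffWitnessOut_match_sequences.2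
def Claim_exact_match_sequences : Prop := ∀ (words : List Int) (data : List Int) (window : Int), Dom_match_sequences words data window → D_match_sequences words data window → match_sequences words data window ≠ match_sequences_alt words data window


-- ===== LEMMAS AND PROOFS =====

-- proof-side canonical description of B's index: positions (counted from k) of v in l
def idxs (v : Int) : List Int → Int → List Int
  | [], _ => []
  | x :: t, k => (if x = v then [k] else []) ++ idxs v t (k + 1)

theorem mem_idxs (v : Int) (l : List Int) (k p : Int) :
    p ∈ idxs v l k ↔ ∃ m : Nat, l[m]? = some v ∧ p = k + m := by
  induction l generalizing k with
  | nil => simp [idxs]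
  | cons x t ih =>
    simp only [idxs, List.mem_append]
    constructor
    · rintro (h | h)
      · split_ifs at h with hx
        · simp only [List.mem_singleton] at h
          exact ⟨0, by simp [hx], by simp [h]⟩
        · simp at h
      · obtain ⟨m, hm, hp⟩ := (ih (k + 1)).mp h
        exact ⟨m + 1, by simpa using hm, by push_cast; omega⟩
    · rintro ⟨m, hm, hp⟩
      cases m with
      | zero =>
        left
        simp only [List.getElem?_cons_zero, Option.some.injEq] at hm
        simp [hm, hp]
      | succ m =>
        right
        exact (ih (k + 1)).mpr ⟨m, by simpa using hm, by push_cast at hp ⊢; omega⟩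

theorem pairwise_idxs (v : Int) (l : List Int) (k : Int) :
    List.Pairwise (· < ·) (idxs v l k) := by
  induction l generalizing k with
  | nil => exact List.Pairwise.nil
  | cons x t ih =>
    simp only [idxs]
    refine List.pairwise_append.mpr ⟨?_, ih (k + 1), ?_⟩
    · split_ifs <;> simp
    · intro p hp q hq
      obtain ⟨m, _, hq'⟩ := (mem_idxs v t (k + 1) q).mp hq
      split_ifs at hp with hx
      · simp only [List.mem_singleton] at hp; omega
      · simp at hp

theorem get?_buildPos (l : List Int) (k : Int) (d : PySem.Dict Int (List Int)) (v : Int) :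
    (buildPos l k d).get? v =
      match d.get? v with
      | some ps => some (ps ++ idxs v l k)
      | none => if v ∈ l then some (idxs v l k) else none := by
  induction l generalizing k d with
  | nil => cases h : d.get? v <;> simp [buildPos, idxs, h]
  | cons x t ih =>
    simp only [buildPos]
    rw [ih]
    rw [PySem.Dict.get?_insert]
    by_cases hvx : v = x
    · subst hvx
      cases h : d.get? v with
      | some ps =>
        simp [idxs, PySem.Dict.getD_eq_get?_getD, h]
      | none =>
        simp [idxs, PySem.Dict.getD_eq_get?_getD, h]
    · simp only [if_neg hvx]
      have hx : ¬ x = v := fun h => hvx h.symm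
      cases h : d.get? v with
      | some ps => simp [idxs, hx]
      | none => simp [idxs, hx, List.mem_cons, hvx]

theorem get?_buildPos0 (data : List Int) (v : Int) :
    (buildPos data 0 PySem.Dict.empty).get? v =
      if v ∈ data then some (idxs v data 0) else none := by
  rw [get?_buildPos]
  simp [PySem.Dict.get?_empty]

theorem mwInner_eq_none (v : Int) (l : List Int) (j0 : Int) :
    mwInner v l j0 = none ↔ v ∉ l := by
  induction l generalizing j0 with
  | nil => simp [mwInner]
  | cons y t ih =>
    simp only [mwInner]
    split_ifs with h
    · simp [h]
    · rw [ih]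
      simp [List.mem_cons, h]

theorem mwInner_eq_some (v : Int) (l : List Int) (j0 j : Int) :
    mwInner v l j0 = some j ↔
      ∃ m : Nat, j = j0 + m ∧ l[m]? = some v ∧ ∀ m' : Nat, m' < m → ¬ l[m']? = some v := by
  induction l generalizing j0 with
  | nil => simp [mwInner]
  | cons y t ih =>
    simp only [mwInner]
    split_ifs with h
    · constructor
      · intro hj
        simp only [Option.some.injEq] at hj
        exact ⟨0, by omega, by simp [h], by omega⟩
      · rintro ⟨m, hm, hv, hmin⟩
        cases m with
        | zero => simp [hm]
        | succ m =>
          exact absurd (by simp [h] : (y :: t)[0]? = some v) (hmin 0 (Nat.succ_pos m))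
    · rw [ih (j0 + 1)]
      constructor
      · rintro ⟨m, hm, hv, hmin⟩
        refine ⟨m + 1, by push_cast; omega, by simpa using hv, ?_⟩
        intro m' hm'
        cases m' with
        | zero => simp; exact fun he => h he.symm
        | succ m' => simpa using hmin m' (by omega)
      · rintro ⟨m, hm, hv, hmin⟩
        cases m with
        | zero =>
          simp only [List.getElem?_cons_zero, Option.some.injEq] at hv
          exact absurd hv.symm h
        | succ m =>
          refine ⟨m, by push_cast at hm ⊢; omega, by simpa using hv, ?_⟩
          intro m' hm'
          simpa using hmin (m' + 1) (by omega)

theorem mwInner_mem (v : Int) (l : List Int) (j0 j : Int) (h : mwInner v l j0 = some j) :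
    v ∈ l := by
  obtain ⟨m, _, hv, _⟩ := (mwInner_eq_some v l j0 j).mp h
  exact List.mem_of_getElem? hv

theorem mwOuter_false_iff (l1 l2 : List Int) (i0 : Int) :
    mwOuter l1 l2 i0 = (false, -1, -1) ↔ ∀ v ∈ l1, v ∉ l2 := by
  induction l1 generalizing i0 with
  | nil => simp [mwOuter]
  | cons x t ih =>
    simp only [mwOuter]
    cases h : mwInner x l2 0 with
    | some j =>
      simp only [List.mem_cons]
      constructor
      · intro he; exact absurd he (by simp)
      · intro hall; exact absurd (mwInner_mem x l2 0 j h) (hall x (Or.inl rfl))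
    | none =>
      rw [ih (i0 + 1)]
      have hx : x ∉ l2 := (mwInner_eq_none x l2 0).mp h
      simp only [List.mem_cons]
      constructor
      · intro hall v hv
        rcases hv with rfl | hv
        · exact hx
        · exact hall v hv
      · intro hall v hv; exact hall v (Or.inr hv)

theorem mwOuter_true_bounds (l1 l2 : List Int) (i0 i j : Int)
    (h : mwOuter l1 l2 i0 = (true, i, j)) : i0 ≤ i ∧ 0 ≤ j := by
  induction l1 generalizing i0 with
  | nil => simp [mwOuter] at h
  | cons x t ih =>
    simp only [mwOuter] at h
    cases hm : mwInner x l2 0 with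
    | some j' =>
      rw [hm] at h
      simp only [Prod.mk.injEq] at h
      obtain ⟨m, hm', _, _⟩ := (mwInner_eq_some x l2 0 j').mp hm
      omega
    | none =>
      rw [hm] at h
      have := ih (i0 + 1) h
      omega

theorem loopA_seq_le (words data : List Int) (window : Int) (f : Nat) (seq wp dp : Int) :
    seq ≤ (loopA words data window f seq wp dp).1 := by
  induction f generalizing seq wp dp with
  | zero => simp [loopA]
  | succ f ih =>
    simp only [loopA]
    split_ifs with h
    · cases hmw : match_window (PySem.List.slice words (some wp) (some (wp + min (min ((data.length : Int) - dp) ((words.length : Int) - wp)) window))) (PySem.List.slice data (some dp) (some (dp + min (min ((data.length : Int) - dp) ((words.length : Int) - wp)) window))) with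
      | mk found ij =>
        cases found
        · simp
        · cases ij with
          | mk i j =>
            have := ih (seq + 1) (wp + i + 1) (dp + j + 1)
            simpa [hmw] using (by omega : seq ≤ seq + 1).trans this
    · simp

-- sorted getD monotone
theorem getD_mono_of_pairwise (ps : List Int) (hs : List.Pairwise (· < ·) ps)
    (i j : Nat) (hij : i ≤ j) (hj : j < ps.length) : ps.getD i 0 ≤ ps.getD j 0 := by
  rcases Nat.lt_or_ge i j with h | h
  · rw [List.getD_eq_getElem ps 0 (by omega), List.getD_eq_getElem ps 0 hj]
    exact le_of_lt (List.pairwise_iff_getElem.mp hs i j (by omega) hj h)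
  · have : i = j := by omega
    subst this; exact le_refl _

theorem bsearch_spec (ps : List Int) (lo : Int) (hs : List.Pairwise (· < ·) ps) :
    ∀ n a b : Nat, b - a ≤ n → a ≤ b → b ≤ ps.length →
    (∀ k, k < a → ps.getD k 0 < lo) → (∀ k, b ≤ k → k < ps.length → ¬ ps.getD k 0 < lo) →
    a ≤ bsearch ps lo n a b ∧ bsearch ps lo n a b ≤ b ∧
    (∀ k, k < bsearch ps lo n a b → ps.getD k 0 < lo) ∧
    (∀ k, bsearch ps lo n a b ≤ k → k < ps.length → ¬ ps.getD k 0 < lo) := by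
  intro n
  induction n with
  | zero =>
    intro a b hn hab hbl hlow hhigh
    simp only [bsearch]
    exact ⟨le_refl _, hab, hlow, fun k hk hkl => hhigh k (by omega) hkl⟩
  | succ n ih =>
    intro a b hn hab hbl hlow hhigh
    simp only [bsearch]
    by_cases hba : a < b
    · rw [if_pos hba]
      have hm1 : a ≤ (a + b) / 2 := by omega
      have hm2 : (a + b) / 2 < b := by omega
      split_ifs with hm
      · have h1 := ih ((a + b) / 2 + 1) b (by omega) (by omega) hbl
          (fun k hk => lt_of_le_of_lt
            (getD_mono_of_pairwise ps hs k ((a + b) / 2) (by omega) (by omega)) hm)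
          hhigh
        exact ⟨by omega, h1.2.1, h1.2.2⟩
      · have h1 := ih a ((a + b) / 2) (by omega) hm1 (by omega) hlow
          (fun k hk hkl hc => hm (lt_of_le_of_lt
            (getD_mono_of_pairwise ps hs ((a + b) / 2) k hk hkl) hc))
        exact ⟨h1.1, by omega, h1.2.2⟩
    · rw [if_neg hba]
      exact ⟨le_refl _, hab, hlow, fun k hk hkl => hhigh k (by omega) hkl⟩

theorem slice_getElem? (data : List Int) (dp rw : Int) (hdp : 0 ≤ dp) (hrw : 0 ≤ rw)
    (m : Nat) :
    (PySem.List.slice data (some dp) (some (dp + rw)))[m]? =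
      if m < rw.toNat ∧ dp.toNat + m < data.length then data[dp.toNat + m]? else none := by
  rw [PySem.List.slice_toNat data hdp (by omega)]
  have ht : (dp + rw).toNat - dp.toNat = rw.toNat := by omega
  rw [ht]
  split_ifs with h
  · rw [List.getElem?_take_of_lt h.1, List.getElem?_drop]
  · apply List.getElem?_eq_none
    simp only [List.length_take, List.length_drop]
    omega

theorem firstInRange_eq (data : List Int) (v dp rw : Int) (hdp : 0 ≤ dp) (hrw : 0 ≤ rw)
    (_hle : dp + rw ≤ (data.length : Int)) :
    firstInRange (buildPos data 0 PySem.Dict.empty) v dp (dp + rw) =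
      Option.map (fun j => dp + j)
        (mwInner v (PySem.List.slice data (some dp) (some (dp + rw))) 0) := by
  unfold firstInRange
  rw [get?_buildPos0]
  by_cases hv : v ∈ data
  · rw [if_pos hv]
    simp only
    have hsort := pairwise_idxs v data 0
    obtain ⟨-, hrb, hlow, hhigh⟩ := bsearch_spec (idxs v data 0) dp hsort (idxs v data 0).length
      0 (idxs v data 0).length (by omega) (by omega) (le_refl _)
      (fun k hk => absurd hk (by omega)) (fun k hk hkl => absurd hkl (by omega))
    set ps := idxs v data 0 with hps
    set r := bsearch ps dp ps.length 0 ps.length with hr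
    have fact_mem : ∀ k, (hk : k < ps.length) → ∃ m : Nat, data[m]? = some v ∧ ps[k] = (m : Int) := by
      intro k hk
      obtain ⟨m, hm, hp⟩ := (mem_idxs v data 0 ps[k]).mp (ps.getElem_mem hk)
      exact ⟨m, hm, by omega⟩
    have fact_complete : ∀ m : Nat, data[m]? = some v → ((m : Int) ∈ ps) := by
      intro m hm
      exact (mem_idxs v data 0 m).mpr ⟨m, hm, by omega⟩
    cases hmw : mwInner v (PySem.List.slice data (some dp) (some (dp + rw))) 0 with
    | none =>
      have hnd : v ∉ PySem.List.slice data (some dp) (some (dp + rw)) :=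
        (mwInner_eq_none v _ 0).mp hmw
      rw [if_neg]
      · rfl
      · rintro ⟨hrlen, hlt⟩
        obtain ⟨m, hm, hpr⟩ := fact_mem r hrlen
        have hge : ¬ ps.getD r 0 < dp := hhigh r (le_refl _) hrlen
        have hgd : ps.getD r 0 = (m : Int) := by rw [List.getD_eq_getElem ps 0 hrlen, hpr]
        have hdm : dp.toNat ≤ m := by omega
        have hmem : v ∈ PySem.List.slice data (some dp) (some (dp + rw)) := by
          have hmlen : m < data.length := (List.getElem?_eq_some_iff.mp hm).1
          have : (PySem.List.slice data (some dp) (some (dp + rw)))[m - dp.toNat]? = some v := by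
            rw [slice_getElem? data dp rw hdp hrw]
            rw [if_pos (by omega)]
            rw [(by omega : dp.toNat + (m - dp.toNat) = m)]
            exact hm
          exact List.mem_of_getElem? this
        exact hnd hmem
    | some j =>
      obtain ⟨m, hj, hv', hmin⟩ :=
        (mwInner_eq_some v (PySem.List.slice data (some dp) (some (dp + rw))) 0 j).mp hmw
      rw [slice_getElem? data dp rw hdp hrw] at hv'
      by_cases hcond : m < rw.toNat ∧ dp.toNat + m < data.length
      swap
      · rw [if_neg hcond] at hv'; exact absurd hv' (by simp)
      rw [if_pos hcond] at hv'
      have hmemp : ((dp.toNat + m : Nat) : Int) ∈ ps := fact_complete (dp.toNat + m) hv'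
      obtain ⟨k0, hk0l, hk0⟩ := List.mem_iff_getElem.mp hmemp
      have hk0r : r ≤ k0 := by
        by_contra hc
        have := hlow k0 (by omega)
        rw [List.getD_eq_getElem ps 0 hk0l, hk0] at this
        omega
      have hrlen : r < ps.length := by omega
      obtain ⟨mq, hmq, hpq⟩ := fact_mem r hrlen
      have hqge : ¬ ps.getD r 0 < dp := hhigh r (le_refl _) hrlen
      have hqle : ps.getD r 0 ≤ ((dp.toNat + m : Nat) : Int) := by
        rw [← hk0]
        exact getD_mono_of_pairwise ps hsort r k0 hk0r hk0l |>.trans_eq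
          (by rw [List.getD_eq_getElem ps 0 hk0l])
      have hgd : ps.getD r 0 = (mq : Int) := by rw [List.getD_eq_getElem ps 0 hrlen, hpq]
      -- mq - dp.toNat is an occurrence offset ≤ m; minimality forces equality
      have hoff : (PySem.List.slice data (some dp) (some (dp + rw)))[mq - dp.toNat]? = some v := by
        rw [slice_getElem? data dp rw hdp hrw]
        rw [if_pos (by omega)]
        rw [(by omega : dp.toNat + (mq - dp.toNat) = mq)]
        exact hmq
      have heq : mq - dp.toNat = m := by
        by_contra hne
        exact (hmin (mq - dp.toNat) (by omega)) hoff
      have hq2 : (mq : Int) ≤ ((dp.toNat + m : Nat) : Int) := hgd ▸ hqle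
      have hq3 : ¬ (mq : Int) < dp := hgd ▸ hqge
      rw [if_pos (show r < ps.length ∧ ps.getD r 0 < dp + rw from
        ⟨hrlen, by rw [hgd]; omega⟩)]
      rw [hgd]
      simp only [Option.map_some, Option.some.injEq]
      omega
  · rw [if_neg hv]
    have : v ∉ PySem.List.slice data (some dp) (some (dp + rw)) := fun hm =>
      hv (PySem.List.mem_of_mem_slice data _ _ hm)
    rw [(mwInner_eq_none v _ 0).mpr this]
    rfl

theorem scanW_eq_mwOuter (pos : PySem.Dict Int (List Int)) (words : List Int)
    (wp dp hi : Int) (dw : List Int) (hwp : 0 ≤ wp)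
    (H : ∀ v, firstInRange pos v dp hi = Option.map (fun j => dp + j) (mwInner v dw 0)) :
    ∀ (n i0 : Nat), wp.toNat + i0 + n ≤ words.length →
      scanW pos words wp dp hi n (i0 : Int) =
        (match mwOuter ((words.drop (wp.toNat + i0)).take n) dw (i0 : Int) with
          | (true, i, j) => some (i, dp + j)
          | (false, _, _) => none) := by
  intro n
  induction n with
  | zero => intro i0 h; simp [scanW, mwOuter]
  | succ n ih =>
    intro i0 h
    have hidx : wp.toNat + i0 < words.length := by omega
    rw [List.drop_eq_getElem_cons hidx, List.take_succ_cons]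
    simp only [scanW, mwOuter]
    have htn : (wp + (i0 : Int)).toNat = wp.toNat + i0 := by omega
    rw [htn, List.getD_eq_getElem words 0 hidx, H]
    cases hmw : mwInner (words[wp.toNat + i0]) dw 0 with
    | some j => simp
    | none =>
      simp only [Option.map_none]
      have hc : (i0 : Int) + 1 = ((i0 + 1 : Nat) : Int) := by push_cast; ring
      rw [hc, ih (i0 + 1) (by omega)]
      rfl

theorem mwOuter_false_shape (l1 l2 : List Int) (i0 : Int)
    (h : (mwOuter l1 l2 i0).1 = false) : mwOuter l1 l2 i0 = (false, -1, -1) := by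
  induction l1 generalizing i0 with
  | nil => rfl
  | cons x t ih =>
    simp only [mwOuter] at h ⊢
    cases hm : mwInner x l2 0 with
    | some j => rw [hm] at h; simp at h
    | none => rw [hm] at h; exact ih (i0 + 1) h

theorem loopA_eq_loopB_of_nonneg (words data : List Int) (window : Int) (hw : 0 ≤ window) :
    ∀ (f : Nat) (seq wp dp : Int), 0 ≤ wp → 0 ≤ dp →
      loopA words data window f seq wp dp =
        loopB words data window (buildPos data 0 PySem.Dict.empty) f seq wp dp := by
  intro f
  induction f with
  | zero => intros; rfl
  | succ f ih =>
    intro seq wp dp hwp hdp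
    simp only [loopA, loopB]
    split_ifs with hg
    · obtain ⟨hdl, hwl⟩ := hg
      have hrw0 : 0 ≤ min (min ((data.length : Int) - dp) ((words.length : Int) - wp)) window := by omega
      have hrwd : dp + min (min ((data.length : Int) - dp) ((words.length : Int) - wp)) window ≤ (data.length : Int) := by omega
      have hrww : wp + min (min ((data.length : Int) - dp) ((words.length : Int) - wp)) window ≤ (words.length : Int) := by omega
      set rw := min (min ((data.length : Int) - dp) ((words.length : Int) - wp)) window with hrwdef
      have hscan := scanW_eq_mwOuter (buildPos data 0 PySem.Dict.empty) words wp dp (dp + rw)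
        (PySem.List.slice data (some dp) (some (dp + rw))) hwp
        (fun v => firstInRange_eq data v dp rw hdp hrw0 hrwd) rw.toNat 0 (by omega)
      simp only [Nat.add_zero, Nat.cast_zero] at hscan
      have hww : PySem.List.slice words (some wp) (some (wp + rw)) = (words.drop wp.toNat).take rw.toNat := by
        rw [PySem.List.slice_toNat words hwp (by omega)]
        congr 1
        omega
      rw [hscan, match_window, hww]
      cases hmo : mwOuter ((words.drop wp.toNat).take rw.toNat)
          (PySem.List.slice data (some dp) (some (dp + rw))) 0 with
      | mk found ij =>
        cases found
        · cases ij with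
          | mk i j => rfl
        · cases ij with
          | mk i j =>
            obtain ⟨hi0, hj0⟩ := mwOuter_true_bounds _ _ 0 i j hmo
            exact ih (seq + 1) (wp + i + 1) (dp + j + 1) (by omega) (by omega)
    · rfl

theorem two_le_of_mem_slice_one (l : List Int) (e v : Int)
    (h : v ∈ PySem.List.slice l (some 1) (some e)) : 2 ≤ l.length := by
  by_contra hlt
  have hlen := PySem.List.length_slice l 1 e
  have h1 : PySem.List.clampIdx l.length 1 = min 1 l.length := by
    simp [PySem.List.clampIdx]
  have h2 : PySem.List.clampIdx l.length e ≤ l.length := PySem.List.clampIdx_le l.length e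
  have h0 : (PySem.List.slice l (some 1) (some e)).length = 0 := by omega
  rw [List.length_eq_zero_iff] at h0
  rw [h0] at h
  simp at h

-- first step of A's loop for a negative window (pointers at 1, both lists of length ≥ 2)
theorem loopA_neg_step (words data : List Int) (window : Int) (f : Nat) (seq : Int)
    (hdl : 1 < (data.length : Int)) (hwl : 1 < (words.length : Int)) (hwneg : window < 0) :
    loopA words data window (Nat.succ f) seq 1 1 =
      (match match_window (PySem.List.slice words (some 1) (some (1 + window)))
          (PySem.List.slice data (some 1) (some (1 + window))) with
        | (true, i, j) => loopA words data window f (seq + 1) (1 + i + 1) (1 + j + 1)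
        | (false, _, _) => (seq, 1, 1)) := by
  simp only [loopA]
  rw [if_pos ⟨hdl, hwl⟩]
  have hmin : min (min ((data.length : Int) - 1) ((words.length : Int) - 1)) window = window := by
    omega
  rw [hmin]

theorem loopB_neg_step (words data : List Int) (window : Int)
    (pos : PySem.Dict Int (List Int)) (f : Nat) (seq : Int)
    (hdl : 1 < (data.length : Int)) (hwl : 1 < (words.length : Int)) (hwneg : window < 0) :
    loopB words data window pos (Nat.succ f) seq 1 1 = (seq, 1, 1) := by
  simp only [loopB]
  rw [if_pos ⟨hdl, hwl⟩]
  have hmin : min (min ((data.length : Int) - 1) ((words.length : Int) - 1)) window = window := by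
    omega
  rw [hmin]
  have h0 : window.toNat = 0 := by omega
  rw [h0]
  rfl

-- ===== VERDICT (by name: the statement is the Claim_ definition above) =====
theorem match_sequences_spec : Claim_unchanged_match_sequences := by
  intro words data window _ hnd
  show match_sequences words data window = match_sequences_alt words data window
  unfold match_sequences match_sequences_alt
  split_ifs with hlen
  · rfl
  · by_cases hw : 0 ≤ window
    · exact loopA_eq_loopB_of_nonneg words data window hw _ 1 1 1 (by omega) (by omega)
    · by_cases hg : 1 < (data.length : Int) ∧ 1 < (words.length : Int)
      · rw [loopA_neg_step words data window _ 1 hg.1 hg.2 (by omega),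
            loopB_neg_step words data window _ _ 1 hg.1 hg.2 (by omega)]
        have hnoshare : ∀ v ∈ PySem.List.slice words (some 1) (some (1 + window)),
            v ∉ PySem.List.slice data (some 1) (some (1 + window)) := by
          intro v hv hvd
          exact hnd ⟨by omega, v, hv, hvd⟩
        rw [match_window, (mwOuter_false_iff _ _ 0).mpr hnoshare]
      · simp only [loopA, loopB]
        rw [if_neg hg, if_neg hg]

theorem match_sequences_changed : Claim_changed_match_sequences := by
  unfold Claim_changed_match_sequences; decide

theorem match_sequences_tight : Claim_exact_match_sequences := by
  unfold Claim_exact_match_sequences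
  intro words data window _ hd
  obtain ⟨hwneg, v, hvw, hvd⟩ := hd
  have hw2 : 2 ≤ words.length := two_le_of_mem_slice_one words _ v hvw
  have hd2 : 2 ≤ data.length := two_le_of_mem_slice_one data _ v hvd
  have hB : match_sequences_alt words data window = (1, 1, 1) := by
    unfold match_sequences_alt
    rw [if_neg (by omega)]
    rw [loopB_neg_step words data window _ _ 1 (by omega) (by omega) hwneg]
  have hshare : ¬ ∀ u ∈ PySem.List.slice words (some 1) (some (1 + window)),
      u ∉ PySem.List.slice data (some 1) (some (1 + window)) := fun hall => hall v hvw hvd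
  have hA : 2 ≤ (match_sequences words data window).1 := by
    unfold match_sequences
    rw [if_neg (by omega)]
    rw [loopA_neg_step words data window _ 1 (by omega) (by omega) hwneg]
    cases hmo : match_window (PySem.List.slice words (some 1) (some (1 + window)))
        (PySem.List.slice data (some 1) (some (1 + window))) with
    | mk found ij =>
      cases found
      · simp only [match_window] at hmo
        have hsh := (mwOuter_false_iff _ _ 0).mp
          (mwOuter_false_shape _ _ 0 (by rw [hmo]))
        exact absurd hsh hshare
      · cases ij with
        | mk i j =>
          have hle := loopA_seq_le words data window (data.length + words.length)
            (1 + 1) (1 + i + 1) (1 + j + 1)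
          simpa using hle
  intro he
  rw [he, hB] at hA
  norm_num at hA
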